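-- pv_equiv track=rewrite | github.com/JMittelbach/BiTUGA | bin/make_metadata.py | parse_excludes
-- ===== SOURCE A (Python) =====
-- def parse_excludes(raw_list):
--     ids = set()
--     for token in raw_list:
--         for part in token.replace(",", " ").split():
--             part = part.strip()
--             if part:
--                 ids.add(part)
--     return ids
-- ===== SOURCE B (Python) =====
-- def parse_excludes(raw_list):
--     # Single character-level scan: a tiny state machine that accumulates the
--     # current word and flushes it at every comma or whitespace character.
--     ids = set()
--     for token in raw_list:
--         word = []
--         for ch in token:
--             if ch == "," or ch.isspace():
--                 if word:
--                     ids.add("".join(word))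
--                     word = []
--             else:
--                 word.append(ch)
--         if word:
--             ids.add("".join(word))
--     return ids
-- ===== Notes on version B (the rewrite author's own statement) =====
-- stated objective: alternative
-- what changed: Replaces A's replace/split/strip string-method pipeline with a character-level state machine that scans each token once, accumulating the current word and flushing it at commas and whitespace, so no intermediate replaced string or split list is ever built.
import Mathlib
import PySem

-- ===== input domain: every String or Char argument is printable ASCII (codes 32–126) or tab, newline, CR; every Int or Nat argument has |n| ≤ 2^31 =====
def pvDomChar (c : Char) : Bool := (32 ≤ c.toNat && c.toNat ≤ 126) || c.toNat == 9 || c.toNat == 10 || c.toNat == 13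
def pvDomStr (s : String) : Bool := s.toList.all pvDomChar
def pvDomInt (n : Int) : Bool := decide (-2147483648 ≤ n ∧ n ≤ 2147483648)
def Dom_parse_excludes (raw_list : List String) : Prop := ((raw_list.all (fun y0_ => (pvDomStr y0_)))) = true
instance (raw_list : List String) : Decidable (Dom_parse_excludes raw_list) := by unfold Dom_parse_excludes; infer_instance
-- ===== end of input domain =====

-- B replaces A's replace/split/strip string-method pipeline with a character-level state machine scanning each token once; same exact result, a genuinely different decomposition.


-- ===== PORT A =====
-- ids = set(); for token: for part in token.replace(",", " ").split(): part = part.strip(); if part: ids.add(part); return ids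
def parse_excludes (raw_list : List String) : List String :=
  raw_list.foldl (fun ids token =>
    (PySem.Str.split₀ (PySem.Str.replace token "," " ")).foldl (fun ids part =>
      let part' := PySem.Str.strip part
      if part' = "" then ids else PySem.Set.add ids part') ids) PySem.Set.empty

-- ===== PORT B =====
-- inner char loop of B: state (ids, word); flush word at ',' or whitespace
def pvScanStep (st : PySem.Set String × List Char) (ch : Char) : PySem.Set String × List Char :=
  if ch = ',' ∨ PySem.Chars.isspace ch then
    if st.2 ≠ [] then (PySem.Set.add st.1 (String.ofList st.2), []) else st
  else (st.1, st.2 ++ [ch])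

-- for token: word = []; for ch: pvScanStep; if word: ids.add(''.join(word)); return ids
def parse_excludes_alt (raw_list : List String) : List String :=
  raw_list.foldl (fun ids token =>
    let st := token.toList.foldl pvScanStep (ids, [])
    if st.2 ≠ [] then PySem.Set.add st.1 (String.ofList st.2) else st.1) PySem.Set.empty

-- ===== PRECONDITION & SPEC =====
def Spec_parse_excludes (raw_list : List String) (out : List String) : Prop := out = parse_excludes_alt raw_list
instance (raw_list : List String) (out : List String) : Decidable (Spec_parse_excludes raw_list out) := by unfold Spec_parse_excludes; infer_instance

-- ===== CLAIM (what is proved, stated in full; the proofs are below) =====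
def Claim_equal_parse_excludes : Prop := ∀ (raw_list : List String), Dom_parse_excludes raw_list → Spec_parse_excludes raw_list (parse_excludes raw_list)

-- ===== LEMMAS AND PROOFS =====

-- the single-character substitution that s.replace(",", " ") performs
def pvSub (c : Char) : Char := if c = ',' then ' ' else c

theorem pvReplaceGo_map (fuel : Nat) : ∀ (l acc : List Char), l.length ≤ fuel →
    PySem.Chars.replace.go [','] [' '] fuel l acc = acc.reverse ++ l.map pvSub := by
  induction fuel with
  | zero =>
    intro l acc h
    have hl : l = [] := List.eq_nil_of_length_eq_zero (Nat.le_zero.mp h)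
    subst hl; simp [PySem.Chars.replace.go]
  | succ n ih =>
    intro l acc h
    cases l with
    | nil => simp [PySem.Chars.replace.go]
    | cons c t =>
      by_cases hc : c = ','
      · subst hc
        have hpre : List.isPrefixOf [','] (',' :: t) = true := by
          simp [List.isPrefixOf]
        simp only [PySem.Chars.replace.go, hpre, if_pos]
        rw [show List.drop (List.length [',']) (',' :: t) = t from rfl]
        rw [ih t (List.reverse [' '] ++ acc) (by simpa using h)]
        simp [pvSub]
      · have hpre : List.isPrefixOf [','] (c :: t) = false := by
          simp [List.isPrefixOf]
          exact fun hh => (hc hh.symm).elim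
        simp only [PySem.Chars.replace.go, hpre, Bool.false_eq_true, if_false]
        rw [ih t (c :: acc) (by simpa using h)]
        simp [pvSub, hc]

theorem pvReplace_map (l : List Char) : PySem.Chars.replace l [','] [' '] = l.map pvSub := by
  simp only [PySem.Chars.replace, List.isEmpty_cons, Bool.false_eq_true, if_false]
  exact pvReplaceGo_map l.length l [] le_rfl

-- the parts A iterates over, at the char level
theorem pvTokens_eq (t : String) :
    PySem.Str.split₀ (PySem.Str.replace t "," " ")
      = (PySem.Chars.split₀ (t.toList.map pvSub)).map String.ofList := by
  simp only [PySem.Str.split₀, PySem.Str.replace, String.toList_ofList]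
  rw [show (("," : String).toList) = [','] from rfl, show ((" " : String).toList) = [' '] from rfl,
    pvReplace_map]

-- accumulator extraction for split₀.go
theorem pvSplitGo_acc (s : List Char) : ∀ (cur : List Char) (acc : List (List Char)),
    PySem.Chars.split₀.go s cur acc = acc.reverse ++ PySem.Chars.split₀.go s cur [] := by
  induction s with
  | nil =>
    intro cur acc
    by_cases hcur : cur.isEmpty = true <;> simp [PySem.Chars.split₀.go, hcur]
  | cons c rest ih =>
    intro cur acc
    by_cases hsp : PySem.Chars.isspace c = true
    · by_cases hcur : cur.isEmpty = true
      · simp only [PySem.Chars.split₀.go, hsp, hcur, if_pos]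
        exact ih [] acc
      · simp only [PySem.Chars.split₀.go, hsp, hcur, if_pos, Bool.false_eq_true, if_false]
        rw [ih [] (cur.reverse :: acc), ih [] [cur.reverse]]
        simp
    · simp only [PySem.Chars.split₀.go, hsp, Bool.false_eq_true, if_false]
      exact ih (c :: cur) acc

-- every piece produced by split() is nonempty and space-free
theorem pvSplitGo_pieces (s : List Char) : ∀ (cur : List Char) (acc : List (List Char)),
    (∀ c ∈ cur, PySem.Chars.isspace c = false) →
    (∀ p ∈ acc, p ≠ [] ∧ ∀ c ∈ p, PySem.Chars.isspace c = false) →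
    ∀ p ∈ PySem.Chars.split₀.go s cur acc, p ≠ [] ∧ ∀ c ∈ p, PySem.Chars.isspace c = false := by
  induction s with
  | nil =>
    intro cur acc hcur hacc p hp
    by_cases hc : cur.isEmpty = true
    · simp only [PySem.Chars.split₀.go, hc, if_pos, List.mem_reverse] at hp
      exact hacc p hp
    · simp only [PySem.Chars.split₀.go, hc, Bool.false_eq_true, if_false, List.mem_reverse,
        List.mem_cons] at hp
      rcases hp with hp | hp
      · subst hp
        refine ⟨by simpa [List.isEmpty_iff] using hc, ?_⟩
        intro c hcmem; exact hcur c (List.mem_reverse.mp hcmem)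
      · exact hacc p hp
  | cons c rest ih =>
    intro cur acc hcur hacc p hp
    by_cases hsp : PySem.Chars.isspace c = true
    · by_cases hc : cur.isEmpty = true
      · simp only [PySem.Chars.split₀.go, hsp, hc, if_pos] at hp
        exact ih [] acc (by simp) hacc p hp
      · simp only [PySem.Chars.split₀.go, hsp, hc, if_pos, Bool.false_eq_true, if_false] at hp
        refine ih [] (cur.reverse :: acc) (by simp) ?_ p hp
        intro q hq
        rcases List.mem_cons.mp hq with hq | hq
        · subst hq
          refine ⟨by simpa [List.isEmpty_iff] using hc, ?_⟩
          intro d hd; exact hcur d (List.mem_reverse.mp hd)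
        · exact hacc q hq
    · simp only [PySem.Chars.split₀.go, hsp, Bool.false_eq_true, if_false] at hp
      refine ih (c :: cur) acc ?_ hacc p hp
      intro d hd
      rcases List.mem_cons.mp hd with hd | hd
      · subst hd; simpa using hsp
      · exact hcur d hd

theorem pvSplit_pieces (s : List Char) :
    ∀ p ∈ PySem.Chars.split₀ s, p ≠ [] ∧ ∀ c ∈ p, PySem.Chars.isspace c = false := by
  intro p hp
  exact pvSplitGo_pieces s [] [] (by simp) (by simp) p hp

theorem pvStrip_id (p : List Char) (h : ∀ c ∈ p, PySem.Chars.isspace c = false) :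
    PySem.Chars.strip p = p := by
  have hl : PySem.Chars.lstrip p = p := by
    simp only [PySem.Chars.lstrip]
    apply List.dropWhile_eq_self_iff.mpr
    intro hlen hx
    exact absurd hx (by simp [h _ (p.getElem_mem hlen)])
  have hr : PySem.Chars.rstrip p = p := by
    simp only [PySem.Chars.rstrip]
    rw [List.dropWhile_eq_self_iff.mpr]
    · simp
    · intro hlen hx
      have hm : p.reverse[0] ∈ p := List.mem_reverse.mp (List.getElem_mem hlen)
      rw [h _ hm] at hx
      exact Bool.noConfusion hx
  simp [PySem.Chars.strip, hl, hr]

-- A's inner loop over already-clean parts is just repeated set.add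
theorem pvInner_eq (parts : List String) : ∀ (ids : PySem.Set String),
    (∀ p ∈ parts, PySem.Str.strip p = p ∧ p ≠ "") →
    parts.foldl (fun ids part =>
      let part' := PySem.Str.strip part
      if part' = "" then ids else PySem.Set.add ids part') ids
    = parts.foldl PySem.Set.add ids := by
  induction parts with
  | nil => intro ids _; rfl
  | cons p t ih =>
    intro ids h
    have hp := h p (List.mem_cons_self)
    simp only [List.foldl_cons, hp.1, hp.2, if_false]
    exact ih _ (fun q hq => h q (List.mem_cons_of_mem _ hq))

theorem pvParts_clean (t : String) :
    ∀ p ∈ PySem.Str.split₀ (PySem.Str.replace t "," " "), PySem.Str.strip p = p ∧ p ≠ "" := by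
  intro p hp
  rw [pvTokens_eq] at hp
  rcases List.mem_map.mp hp with ⟨q, hq, rfl⟩
  have hclean := pvSplit_pieces _ q hq
  constructor
  · simp only [PySem.Str.strip, String.toList_ofList]
    rw [pvStrip_id q hclean.2]
  · intro hcontra
    have : q = [] := by
      have := congrArg String.toList hcontra
      simpa using this
    exact hclean.1 this

-- B's flush condition after a char c equals isspace on the substituted char
theorem pvCond_eq (c : Char) :
    (c = ',' ∨ PySem.Chars.isspace c = true) ↔ PySem.Chars.isspace (pvSub c) = true := by
  by_cases hc : c = ','
  · subst hc; simp [pvSub]; decide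
  · simp [pvSub, hc]

-- THE key lemma: B's scanner with pending word w equals folding Set.add over
-- the pieces split₀.go finds in the substituted string with cur = w.reverse.
theorem pvScan_eq (s : List Char) : ∀ (ids : PySem.Set String) (w : List Char),
    (let st := s.foldl pvScanStep (ids, w);
      if st.2 ≠ [] then PySem.Set.add st.1 (String.ofList st.2) else st.1)
    = ((PySem.Chars.split₀.go (s.map pvSub) w.reverse []).map String.ofList).foldl
        PySem.Set.add ids := by
  induction s with
  | nil =>
    intro ids w
    cases w with
    | nil => simp [PySem.Chars.split₀.go]
    | cons a t =>
      simp [PySem.Chars.split₀.go]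
  | cons c rest ih =>
    intro ids w
    by_cases hcond : c = ',' ∨ PySem.Chars.isspace c = true
    · have hsp : PySem.Chars.isspace (pvSub c) = true := (pvCond_eq c).mp hcond
      cases w with
      | nil =>
        have hstep : pvScanStep (ids, ([] : List Char)) c = (ids, []) := by
          simp [pvScanStep, hcond]
        simp only [List.map_cons, List.foldl_cons, hstep]
        rw [ih ids []]
        simp [PySem.Chars.split₀.go, hsp]
      | cons a t =>
        have hstep : pvScanStep (ids, a :: t) c
            = (PySem.Set.add ids (String.ofList (a :: t)), []) := by
          simp [pvScanStep, hcond]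
        simp only [List.map_cons, List.foldl_cons, hstep]
        rw [ih _ []]
        have hcur : ((a :: t).reverse).isEmpty = false := by simp
        simp only [PySem.Chars.split₀.go, hsp, hcur, if_pos, Bool.false_eq_true, if_false]
        rw [pvSplitGo_acc (rest.map pvSub) [] [(a :: t).reverse.reverse]]
        simp
    · have hc : ¬ c = ',' := fun h => hcond (Or.inl h)
      have hsp : PySem.Chars.isspace c = false := by
        cases h : PySem.Chars.isspace c
        · rfl
        · exact absurd (Or.inr h) hcond
      have hsp' : PySem.Chars.isspace (pvSub c) = false := by
        cases h : PySem.Chars.isspace (pvSub c)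
        · rfl
        · exact absurd ((pvCond_eq c).mpr h) hcond
      have hstep : pvScanStep (ids, w) c = (ids, w ++ [c]) := by
        simp [pvScanStep, hcond]
      simp only [List.map_cons, List.foldl_cons, hstep]
      rw [ih ids (w ++ [c])]
      have hsub : pvSub c = c := by simp [pvSub, hc]
      simp [PySem.Chars.split₀.go, hsub, hsp]

-- ===== VERDICT (by name: the statement is the Claim_ definition above) =====
theorem parse_excludes_spec : Claim_equal_parse_excludes := by
  intro raw_list _
  show parse_excludes raw_list = parse_excludes_alt raw_list
  unfold parse_excludes parse_excludes_alt
  apply PySem.List.foldl_congr_mem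
  intro ids token _
  rw [pvInner_eq _ ids (pvParts_clean token), pvTokens_eq]
  have := pvScan_eq token.toList ids []
  simp only [List.reverse_nil] at this
  rw [this]
  rfl
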